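-- pv_equiv track=rewrite | github.com/lsi3131/coding_test | baekjoon/backtracking/test_password_1759.py | solution
-- ===== SOURCE A (Python) =====
-- def solution(s_list, l):
--     s = ''.join(sorted(s_list))
--     vowels = 'aeiou'
--     results = []
--
--     def dfs(path, start, vowel_count, l):
--         # 최소 2개 이상의 자음을 위한 처리
--         # 자음 길이 = 문자열 개수 - 모음 개수
--         if not ((l - vowel_count) >= 2):
--             return
--
--         if len(path) == l:
--             # 모음이 최소 1개 이상 필요
--             if vowel_count >= 1:
--                 results.append(path)
--
--         for i in range(start, len(s)):
--             next_vowel_count = vowel_count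
--             if s[i] in vowels:
--                 next_vowel_count += 1
--             dfs(path + s[i], i + 1, next_vowel_count, l)
--
--     dfs('', 0, 0, l)
--     return results
-- ===== SOURCE B (Python) =====
-- def solution(s_list, l):
--     # Generate-and-filter: build all length-l combinations of the sorted
--     # characters (lexicographic order), then keep those with >=1 vowel and
--     # >=2 consonants.  Replaces A's pruned DFS over all subsets.
--     if l < 0:
--         return []
--     s = ''.join(sorted(s_list))
--     vowels = 'aeiou'
--
--     def combos(seq, k):
--         if k == 0:
--             return ['']
--         if len(seq) < k:
--             return []
--         rest = seq[1:]
--         return [seq[0] + t for t in combos(rest, k - 1)] + combos(rest, k)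
--
--     out = []
--     for w in combos(s, l):
--         vc = sum(c in vowels for c in w)
--         if vc >= 1 and l - vc >= 2:
--             out.append(w)
--     return out
-- ===== Notes on version B (the rewrite author's own statement) =====
-- stated objective: alternative
-- what changed: Replaces A's pruned recursive DFS that walks subsets of the sorted character string with a flat generate-and-filter pass: a binomial include/exclude combination generator produces exactly the length-l combinations in the same lexicographic order, and a single filter keeps those with at least one vowel and at least two consonants.
import Mathlib
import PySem

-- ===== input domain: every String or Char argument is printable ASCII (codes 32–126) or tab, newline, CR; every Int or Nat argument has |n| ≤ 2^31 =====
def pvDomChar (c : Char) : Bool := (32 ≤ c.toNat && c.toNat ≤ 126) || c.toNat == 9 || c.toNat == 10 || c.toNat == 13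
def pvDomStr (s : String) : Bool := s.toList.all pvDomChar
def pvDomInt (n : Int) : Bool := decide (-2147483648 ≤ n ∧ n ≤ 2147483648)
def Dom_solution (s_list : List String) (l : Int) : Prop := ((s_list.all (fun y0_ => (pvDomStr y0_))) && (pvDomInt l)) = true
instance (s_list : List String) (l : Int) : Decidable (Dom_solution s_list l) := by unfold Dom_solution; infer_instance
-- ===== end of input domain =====

-- B replaces A's pruned DFS over subsets of the character string by a single
-- generate-and-filter pass over the length-l combinations (objective: alternative).

-- ===== PORT A =====
-- vowels = 'aeiou'; for a single char c, Python's 'c in vowels' is membership among these chars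
def vowelsA : List Char := ['a', 'e', 'i', 'o', 'u']

mutual
-- the inner 'def dfs(path, start, vowel_count, l)' of A; the mutated 'results' is threaded as 'acc'
def dfsA (cs : List Char) (path : List Char) (start : Nat) (vc l : Int)
    (acc : List String) : List String :=
  if ¬ (2 ≤ l - vc) then acc
  else
    -- 'if len(path) == l: if vowel_count >= 1: results.append(path)'
    let acc1 := if (path.length : Int) = l ∧ 1 ≤ vc then acc ++ [String.ofList path] else acc
    dfsALoop cs path start vc l acc1
  termination_by (cs.length + 1 - start, 1)

-- 'for i in range(start, len(s)): …' with the recursive call on each i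
def dfsALoop (cs : List Char) (path : List Char) (i : Nat) (vc l : Int)
    (acc : List String) : List String :=
  if h : i < cs.length then
    let c := cs[i]
    let vc' := if c ∈ vowelsA then vc + 1 else vc
    dfsALoop cs path (i + 1) vc l (dfsA cs (path ++ [c]) (i + 1) vc' l acc)
  else acc
  termination_by (cs.length + 1 - i, 0)
  decreasing_by
  · exact Prod.Lex.left _ _ (by omega)
  · exact Prod.Lex.left _ _ (by omega)
end

def solution (s_list : List String) (l : Int) : List String :=
  -- s = ''.join(sorted(s_list)); dfs('', 0, 0, l); return results
  let s := PySem.Str.join "" (PySem.List.sorted s_list (fun x => x) false)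
  dfsA s.toList [] 0 0 l []

-- ===== PORT B =====
def vowelsB : List Char := ['a', 'e', 'i', 'o', 'u']

-- the inner 'def combos(seq, k)' of B; strings built char by char are List Char here,
-- 'seq[0]' / 'seq[1:] = rest' are head / tail of the (guaranteed nonempty) list
def combosB : List Char → Nat → List (List Char)
  | _, 0 => [[]]
  | seq, (k + 1) =>
    if seq.length < k + 1 then []
    else
      match seq with
      | [] => []                                  -- unreachable: seq.length ≥ k + 1 ≥ 1
      | c :: rest => (combosB rest k).map (c :: ·) ++ combosB rest (k + 1)
  termination_by seq _ => seq.length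

-- 'vc = sum(c in vowels for c in w)': the number of vowels of w, as a Python int
def vcountB (w : List Char) : Int := ((w.filter (· ∈ vowelsB)).length : Int)

def solution_alt (s_list : List String) (l : Int) : List String :=
  if l < 0 then []
  else
    let s := PySem.Str.join "" (PySem.List.sorted s_list (fun x => x) false)
    -- 'for w in combos(s, l): if vc >= 1 and l - vc >= 2: out.append(w)'
    (combosB s.toList l.toNat).foldl
      (fun out w => if 1 ≤ vcountB w ∧ 2 ≤ l - vcountB w then out ++ [String.ofList w] else out)
      []

-- ===== PRECONDITION & SPEC =====
def Spec_solution (s_list : List String) (l : Int) (out : List String) : Prop := out = solution_alt s_list l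
instance (s_list : List String) (l : Int) (out : List String) : Decidable (Spec_solution s_list l out) := by unfold Spec_solution; infer_instance

-- ===== CLAIM (what is proved, stated in full; the proofs are below) =====
def Claim_equal_solution : Prop := ∀ (s_list : List String) (l : Int), Dom_solution s_list l → Spec_solution s_list l (solution s_list l)

-- ===== LEMMAS AND PROOFS =====

-- the filter predicate of B, shifted by the vowel count 'vc' A has already accumulated on path
def Pfil (l vc : Int) (t : List Char) : Bool :=
  decide (1 ≤ vc + vcountB t) && decide (2 ≤ l - (vc + vcountB t))

-- what A's dfs call appends after 'acc': all filtered completions of 'path' from index j on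
-- (extA includes the possible append of path itself; extL is just the for-loop's part)
def extA (cs : List Char) (j : Nat) (path : List Char) (vc l : Int) : List String :=
  if (path.length : Int) ≤ l then
    ((combosB (cs.drop j) (l - path.length).toNat).filter (Pfil l vc)).map
      (fun t => String.ofList (path ++ t))
  else []

def extL (cs : List Char) (j : Nat) (path : List Char) (vc l : Int) : List String :=
  if (path.length : Int) + 1 ≤ l then
    ((combosB (cs.drop j) (l - path.length).toNat).filter (Pfil l vc)).map
      (fun t => String.ofList (path ++ t))
  else []

theorem vcountB_nonneg (t : List Char) : 0 ≤ vcountB t := Int.natCast_nonneg _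

theorem vc_shift (vc : Int) (c : Char) (t : List Char) :
    vc + vcountB (c :: t) = (if c ∈ vowelsA then vc + 1 else vc) + vcountB t := by
  have hv : vowelsA = vowelsB := rfl
  by_cases hcv : c ∈ vowelsB <;> simp [vcountB, hcv, hv] <;> omega

theorem combosB_zero (xs : List Char) : combosB xs 0 = [[]] := by simp [combosB]

theorem combosB_short {xs : List Char} {k : Nat} (h : xs.length < k) : combosB xs k = [] := by
  match k with
  | 0 => omega
  | k + 1 =>
    rw [combosB.eq_def]
    simp [h]

theorem combosB_cons {c : Char} {rest : List Char} {k : Nat} (h : ¬ ((c :: rest).length < k + 1)) :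
    combosB (c :: rest) (k + 1) = (combosB rest k).map (c :: ·) ++ combosB rest (k + 1) := by
  rw [combosB.eq_def]
  simp only [if_neg h]

theorem combos_step (cs : List Char) (i k : Nat) (h : i < cs.length) :
    combosB (cs.drop i) (k + 1) =
      (combosB (cs.drop (i + 1)) k).map (cs[i] :: ·) ++ combosB (cs.drop (i + 1)) (k + 1) := by
  have hd : cs.drop i = cs[i] :: cs.drop (i + 1) := List.drop_eq_getElem_cons h
  rw [hd]
  rcases Nat.lt_or_ge (cs.length - (i + 1)) k with hl | hl
  · rw [combosB_short (xs := cs[i] :: cs.drop (i + 1)) (by simp; omega),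
      combosB_short (xs := cs.drop (i + 1)) (k := k) (by simp; omega),
      combosB_short (xs := cs.drop (i + 1)) (k := k + 1) (by simp; omega)]
    simp
  · exact combosB_cons (by simp; omega)

-- pruning is sound: once vc > l - 2, no completion passes the final filter
theorem Pfil_false {l vc : Int} (h : ¬ (2 ≤ l - vc)) (t : List Char) : Pfil l vc t = false := by
  have := vcountB_nonneg t
  simp [Pfil]
  omega

theorem extA_empty {cs : List Char} {j : Nat} {path : List Char} {vc l : Int}
    (h : ¬ (2 ≤ l - vc)) : extA cs j path vc l = [] := by
  unfold extA
  rw [List.filter_eq_nil_iff.mpr (fun t _ => by simp [Pfil_false h t])]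
  simp

-- extA = (maybe path itself) ++ the loop's part
theorem extA_split (cs : List Char) (j : Nat) (path : List Char) (vc l : Int) :
    extA cs j path vc l =
      (if (path.length : Int) = l ∧ 1 ≤ vc ∧ 2 ≤ l - vc then [String.ofList path] else []) ++
        extL cs j path vc l := by
  unfold extA extL
  rcases lt_trichotomy ((path.length : Int)) l with hlt | heq | hgt
  · have h1 : (path.length : Int) ≤ l := le_of_lt hlt
    have h2 : (path.length : Int) + 1 ≤ l := by omega
    have h3 : ¬ ((path.length : Int) = l ∧ 1 ≤ vc ∧ 2 ≤ l - vc) := by omega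
    simp [h1, h2, h3]
  · have h0 : (l - (path.length : Int)).toNat = 0 := by omega
    have h2 : ¬ ((path.length : Int) + 1 ≤ l) := by omega
    by_cases hp : Pfil l vc [] = true
    · have hvc2 : (1 ≤ vc ∧ 2 ≤ l - vc) := by
        simpa [Pfil, vcountB] using hp
      simp [heq, combosB_zero, List.filter, hp, hvc2]
    · have hvc2 : ¬ (1 ≤ vc ∧ 2 ≤ l - vc) := by
        intro hcon; exact hp (by simp [Pfil, vcountB]; omega)
      simp [heq, combosB_zero, List.filter, hp, hvc2]
  · have h1 : ¬ ((path.length : Int) ≤ l) := by omega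
    have h2 : ¬ ((path.length : Int) + 1 ≤ l) := by omega
    have h3 : ¬ ((path.length : Int) = l ∧ 1 ≤ vc ∧ 2 ≤ l - vc) := by omega
    simp [h1, h2, h3]

-- splitting the first loop iteration off the loop's part
theorem extL_step (cs : List Char) (i : Nat) (path : List Char) (vc l : Int)
    (h : i < cs.length) :
    extA cs (i + 1) (path ++ [cs[i]]) (if cs[i] ∈ vowelsA then vc + 1 else vc) l ++
      extL cs (i + 1) path vc l = extL cs i path vc l := by
  set c := cs[i] with hc
  set vc' := if c ∈ vowelsA then vc + 1 else vc with hvc'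
  by_cases hlen : (path.length : Int) + 1 ≤ l
  · have hk : (l - ((path ++ [c]).length : Int)).toNat + 1 = (l - (path.length : Int)).toNat := by
      simp; omega
    set k : Nat := (l - ((path ++ [c]).length : Int)).toNat with hkdef
    have hga : ((path ++ [c]).length : Int) ≤ l := by simp; omega
    have hPfil : ∀ t, Pfil l vc (c :: t) = Pfil l vc' t := by
      intro t
      simp only [Pfil, vc_shift vc c t, hvc']
    have hfe : (Pfil l vc ∘ (c :: ·)) = Pfil l vc' := by
      funext t; simp [Function.comp, hPfil t]
    unfold extA extL
    rw [if_pos hga, if_pos hlen, if_pos hlen, ← hk, combos_step cs i k h, List.filter_append,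
      List.map_append, List.filter_map, hfe, List.map_map]
    congr 1
    refine List.map_congr_left ?_
    intro t ht
    simp [Function.comp, List.append_assoc, ← hc]
  · have hga : ¬ (((path ++ [c]).length : Int) ≤ l) := by simp; omega
    simp [extA, extL, hlen]


-- past the end of the string the loop adds nothing
theorem dfsALoop_last (cs : List Char) (path : List Char) (i : Nat) (vc l : Int)
    (acc : List String) (hle : i ≤ cs.length) (hi : ¬ (i < cs.length)) :
    dfsALoop cs path i vc l acc = acc ++ extL cs i path vc l := by
  rw [dfsALoop, dif_neg hi]
  have hdrop : cs.drop i = [] := List.drop_eq_nil_of_le (by omega)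
  by_cases hlen : (path.length : Int) + 1 ≤ l
  · unfold extL
    rw [if_pos hlen, hdrop, combosB_short (by simp; omega)]
    simp
  · simp [extL, hlen]

-- the main loop invariant, by induction on the number of remaining indices
theorem dfsALoop_eq (m : Nat) :
    ∀ (cs : List Char) (path : List Char) (i : Nat) (vc l : Int) (acc : List String),
      i ≤ cs.length → cs.length - i ≤ m →
      dfsALoop cs path i vc l acc = acc ++ extL cs i path vc l := by
  induction m with
  | zero =>
    intro cs path i vc l acc hle hm
    exact dfsALoop_last cs path i vc l acc hle (by omega)
  | succ m ih =>
    intro cs path i vc l acc hle hm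
    by_cases hi : i < cs.length
    · rw [dfsALoop, dif_pos hi]
      show dfsALoop cs path (i + 1) vc l
          (dfsA cs (path ++ [cs[i]]) (i + 1) (if cs[i] ∈ vowelsA then vc + 1 else vc) l acc)
          = acc ++ extL cs i path vc l
      set c := cs[i] with hc
      set vc' := if c ∈ vowelsA then vc + 1 else vc with hvc'
      have hA : dfsA cs (path ++ [c]) (i + 1) vc' l acc
          = acc ++ extA cs (i + 1) (path ++ [c]) vc' l := by
        rw [dfsA]
        by_cases hpr : ¬ (2 ≤ l - vc')
        · rw [if_pos hpr, extA_empty hpr]; simp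
        · rw [if_neg hpr]
          rw [ih cs (path ++ [c]) (i + 1) vc' l _ (by omega) (by omega)]
          rw [extA_split]
          rw [not_not] at hpr
          have hiff : (((path ++ [c]).length : Int) = l ∧ 1 ≤ vc' ∧ 2 ≤ l - vc')
              ↔ (((path ++ [c]).length : Int) = l ∧ 1 ≤ vc') :=
            ⟨fun ⟨a, b, _⟩ => ⟨a, b⟩, fun ⟨a, b⟩ => ⟨a, b, hpr⟩⟩
          simp only [hiff]
          split_ifs <;> simp
      rw [hA, ih cs path (i + 1) vc l _ (by omega) (by omega), List.append_assoc,
        extL_step cs i path vc l hi]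
    · exact dfsALoop_last cs path i vc l acc hle hi

theorem dfsA_eq (cs : List Char) (path : List Char) (start : Nat) (vc l : Int)
    (acc : List String) (h : start ≤ cs.length) :
    dfsA cs path start vc l acc = acc ++ extA cs start path vc l := by
  rw [dfsA]
  by_cases hpr : ¬ (2 ≤ l - vc)
  · rw [if_pos hpr, extA_empty hpr]; simp
  · rw [if_neg hpr]
    rw [dfsALoop_eq (cs.length - start) cs path start vc l _ h (le_refl _)]
    rw [extA_split]
    rw [not_not] at hpr
    have hiff : (((path.length : Int)) = l ∧ 1 ≤ vc ∧ 2 ≤ l - vc)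
        ↔ (((path.length : Int)) = l ∧ 1 ≤ vc) :=
      ⟨fun ⟨a, b, _⟩ => ⟨a, b⟩, fun ⟨a, b⟩ => ⟨a, b, hpr⟩⟩
    simp only [hiff]
    split_ifs <;> simp

-- ===== VERDICT (by name: the statement is the Claim_ definition above) =====
theorem solution_spec : Claim_equal_solution := by
  intro s_list l _
  unfold Spec_solution solution solution_alt
  set s := PySem.Str.join "" (PySem.List.sorted s_list (fun x => x) false) with hs
  rw [dfsA_eq s.toList [] 0 0 l [] (Nat.zero_le _)]
  by_cases hneg : l < 0
  · have h1 : ¬ (((([] : List Char)).length : Int) ≤ l) := by simp; omega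
    simp [extA, hneg]
  · rw [if_neg hneg]
    rw [PySem.List.foldl_append_ite
      (p := fun w => 1 ≤ vcountB w ∧ 2 ≤ l - vcountB w) (f := fun w => String.ofList w)]
    have hfil : (combosB s.toList l.toNat).filter
          (fun w => decide (1 ≤ vcountB w ∧ 2 ≤ l - vcountB w))
        = (combosB s.toList l.toNat).filter (Pfil l 0) := by
      refine List.filter_congr ?_
      intro w _
      simp [Pfil]
    have h1 : ((([] : List Char)).length : Int) ≤ l := by simp; omega
    have h2 : (l - ((([] : List Char)).length : Int)).toNat = l.toNat := by simp
    simp only [extA, h1, if_pos, h2, List.drop_zero, List.nil_append, hfil]
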